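-- pv_equiv track=rewrite | github.com/ljy82/PROEA_ | interaction_model/data_pro.py | generate_class_to_index
-- ===== SOURCE A (Python) =====
-- def generate_class_to_index(fr_crossview_data, en_crossview_data):
--     class_to_index = {}
--     index = 0
--
--     # 从 fr_crossview 数据中提取本体
--     for crossview in fr_crossview_data:
--         if crossview[1] not in class_to_index:
--             class_to_index[crossview[1]] = index
--             index += 1
--
--     # 从 en_crossview 数据中提取本体
--     for crossview in en_crossview_data:
--         if crossview[1] not in class_to_index:
--             class_to_index[crossview[1]] = index
--             index += 1
--
--     return class_to_index
-- ===== SOURCE B (Python) =====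
-- def generate_class_to_index(fr_crossview_data, en_crossview_data):
--     # Index of each class = number of DISTINCT classes occurring strictly before
--     # its first occurrence; no running counter, no incremental dedup structure.
--     keys = [cv[1] for cv in fr_crossview_data] + [cv[1] for cv in en_crossview_data]
--     return {k: len(set(keys[:i])) for i, k in enumerate(keys) if k not in keys[:i]}
-- ===== Notes on version B (the rewrite author's own statement) =====
-- stated objective: alternative
-- what changed: Instead of a running counter with incremental dict membership, B computes each first-occurrence class's index independently as the number of distinct classes in the prefix before it (len(set(keys[:i]))), via a single comprehension over the concatenated key list.
import Mathlib
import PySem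

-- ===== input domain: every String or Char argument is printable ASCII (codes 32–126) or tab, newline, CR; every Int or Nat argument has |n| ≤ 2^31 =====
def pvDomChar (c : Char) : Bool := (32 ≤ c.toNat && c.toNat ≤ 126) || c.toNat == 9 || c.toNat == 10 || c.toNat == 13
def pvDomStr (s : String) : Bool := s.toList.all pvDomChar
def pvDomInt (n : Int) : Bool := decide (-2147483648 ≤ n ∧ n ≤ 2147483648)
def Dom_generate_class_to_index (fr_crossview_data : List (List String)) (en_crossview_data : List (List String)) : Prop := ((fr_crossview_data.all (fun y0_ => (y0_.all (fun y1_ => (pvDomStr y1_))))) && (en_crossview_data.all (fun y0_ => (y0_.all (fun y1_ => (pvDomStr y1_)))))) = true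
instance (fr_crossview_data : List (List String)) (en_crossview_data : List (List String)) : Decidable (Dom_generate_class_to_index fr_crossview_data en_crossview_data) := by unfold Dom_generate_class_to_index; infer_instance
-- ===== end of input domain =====

-- B replaces A's running counter + incremental dict by a prefix computation: each
-- first-occurrence class gets as index the number of distinct classes before it
-- (alternative decomposition; same return value on every input in Pre_).

-- shared helper: crossview[1] (total form; Pre_ guarantees the index is in range)
def pvKey (cv : List String) : String := (PySem.List.pyGet? cv 1).getD ""

-- ===== PORT A =====
def pvStepA (st : PySem.Dict String Int × Int) (cv : List String) : PySem.Dict String Int × Int :=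
  if st.1.contains (pvKey cv) then st else (st.1.insert (pvKey cv) st.2, st.2 + 1)

def generate_class_to_index (fr_crossview_data : List (List String)) (en_crossview_data : List (List String)) : List (String × Int) :=
  let st1 := fr_crossview_data.foldl pvStepA (PySem.Dict.empty, 0)
  let st2 := en_crossview_data.foldl pvStepA st1
  st2.1.items

-- ===== PORT B =====
-- B's comprehension body: for (k, i) in enumerate(keys), skip if k ∈ keys[:i],
-- else map k to len(set(keys[:i])) (number of distinct classes before position i)
def pvStepB (keys : List String) (d : PySem.Dict String Int) (p : String × Nat) : PySem.Dict String Int :=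
  if (keys.take p.2).contains p.1 then d
  else d.insert p.1 ((PySem.Set.ofList (keys.take p.2)).length : Int)

def generate_class_to_index_alt (fr_crossview_data : List (List String)) (en_crossview_data : List (List String)) : List (String × Int) :=
  let keys := fr_crossview_data.map pvKey ++ en_crossview_data.map pvKey
  (keys.zipIdx.foldl (pvStepB keys) PySem.Dict.empty).items

-- ===== PRECONDITION & SPEC =====
-- Pre_ excludes inputs with an inner list of fewer than 2 elements, on which A raises IndexError.
def Pre_generate_class_to_index (fr_crossview_data : List (List String)) (en_crossview_data : List (List String)) : Prop :=
  ∀ cv ∈ fr_crossview_data ++ en_crossview_data, 2 ≤ cv.length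
instance (fr_crossview_data : List (List String)) (en_crossview_data : List (List String)) : Decidable (Pre_generate_class_to_index fr_crossview_data en_crossview_data) := by unfold Pre_generate_class_to_index; infer_instance

def pvWitness_generate_class_to_index : List (List String) × List (List String) :=
  ([["a", "X"], ["b", "Y"], ["q", "X"]], [["c", "Z"], ["d", "Y"]])

def Spec_generate_class_to_index (fr_crossview_data : List (List String)) (en_crossview_data : List (List String)) (out : List (String × Int)) : Prop := out = generate_class_to_index_alt fr_crossview_data en_crossview_data
instance (fr_crossview_data : List (List String)) (en_crossview_data : List (List String)) (out : List (String × Int)) : Decidable (Spec_generate_class_to_index fr_crossview_data en_crossview_data out) := by unfold Spec_generate_class_to_index; infer_instance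

-- ===== CLAIM (what is proved, stated in full; the proofs are below) =====
def Claim_equal_generate_class_to_index : Prop := ∀ (fr_crossview_data : List (List String)) (en_crossview_data : List (List String)), Dom_generate_class_to_index fr_crossview_data en_crossview_data → Pre_generate_class_to_index fr_crossview_data en_crossview_data → Spec_generate_class_to_index fr_crossview_data en_crossview_data (generate_class_to_index fr_crossview_data en_crossview_data)

-- ===== LEMMAS AND PROOFS =====

-- A's loop body acting on the extracted key
def pvStepK (st : PySem.Dict String Int × Int) (k : String) : PySem.Dict String Int × Int :=
  if st.1.contains k then st else (st.1.insert k st.2, st.2 + 1)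

-- the dict that enumerates u in order
def pvEnum (u : List String) : PySem.Dict String Int :=
  PySem.Dict.mk (u.zipIdx.map (fun p => (p.1, (p.2 : Int))))

theorem pvEnum_keys (u : List String) : (pvEnum u).keys = u := by
  simp [pvEnum, PySem.Dict.keys, List.map_map, Function.comp_def]

theorem pvEnum_contains (u : List String) (k : String) :
    (pvEnum u).contains k = decide (k ∈ u) := by
  rw [PySem.Dict.contains_eq_decide_mem_keys, pvEnum_keys]

theorem pvEnum_insert (u : List String) (k : String) (h : k ∉ u) :
    (pvEnum u).insert k (u.length : Int) = pvEnum (u ++ [k]) := by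
  apply PySem.Dict.ext
  rw [PySem.Dict.items_insert_of_not_contains]
  · simp [pvEnum, List.zipIdx_append]
  · rw [pvEnum_contains]; simp [h]

-- A's loop characterisation
theorem pvLoopA (ks : List String) (u : List String) :
    ks.foldl pvStepK (pvEnum u, (u.length : Int)) =
      (pvEnum (PySem.Set.update u ks), ((PySem.Set.update u ks).length : Int)) := by
  induction ks generalizing u with
  | nil => simp [PySem.Set.update]
  | cons k ks ih =>
    rw [List.foldl_cons]
    have hupd : PySem.Set.update u (k :: ks) = PySem.Set.update (PySem.Set.add u k) ks := by
      simp [PySem.Set.update]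
    by_cases hk : k ∈ u
    · have : pvStepK (pvEnum u, (u.length : Int)) k = (pvEnum u, (u.length : Int)) := by
        simp [pvStepK, pvEnum_contains, hk]
      rw [this, hupd]
      have : PySem.Set.add u k = u := by simp [PySem.Set.add, PySem.Set.contains_eq_listContains, hk]
      rw [this, ih]
    · have hadd : PySem.Set.add u k = u ++ [k] := by
        simp [PySem.Set.add, PySem.Set.contains_eq_listContains, hk]
      have : pvStepK (pvEnum u, (u.length : Int)) k = (pvEnum (u ++ [k]), ((u ++ [k]).length : Int)) := by
        simp [pvStepK, pvEnum_contains, hk, pvEnum_insert u k hk]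
      rw [this, hupd, hadd, ih]

-- B's loop characterisation (reverse induction on the key list)
theorem pvLoopB (ks : List String) :
    ks.zipIdx.foldl (pvStepB ks) PySem.Dict.empty = pvEnum (PySem.List.dedup ks) := by
  induction ks using List.reverseRecOn with
  | nil => rfl
  | append_singleton ks k ih =>
    rw [List.zipIdx_append, List.foldl_append]
    have hcongr : ks.zipIdx.foldl (pvStepB (ks ++ [k])) PySem.Dict.empty =
        ks.zipIdx.foldl (pvStepB ks) PySem.Dict.empty := by
      apply PySem.List.foldl_congr_mem
      intro d p hp
      obtain ⟨k', i⟩ := p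
      have hlt : i < ks.length := by
        have := List.mem_zipIdx hp
        omega
      simp [pvStepB, List.take_append_of_le_length (le_of_lt hlt)]
    rw [hcongr, ih]
    have htake : (ks ++ [k]).take (0 + ks.length) = ks := by
      simp
    show pvStepB (ks ++ [k]) (pvEnum (PySem.List.dedup ks)) (k, 0 + ks.length) = _
    simp only [pvStepB, htake]
    by_cases hk : k ∈ ks
    · have hset : PySem.Set.ofList (ks ++ [k]) = PySem.Set.ofList ks := by
        simp [PySem.Set.ofList_append_singleton, PySem.Set.add,
          PySem.Set.contains_eq_listContains, PySem.Set.mem_ofList, hk]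
      simp [hk, hset]
    · have hset : PySem.Set.ofList (ks ++ [k]) = PySem.Set.ofList ks ++ [k] := by
        simp [PySem.Set.ofList_append_singleton, PySem.Set.add,
          PySem.Set.contains_eq_listContains, PySem.Set.mem_ofList, hk]
      have hnk : k ∉ PySem.Set.ofList ks := by simp [PySem.Set.mem_ofList, hk]
      rw [if_neg (by simp [hk])]
      simp only [PySem.List.dedup_eq_ofList]
      rw [pvEnum_insert _ _ hnk, hset]

-- ===== VERDICT (by name: the statement is the Claim_ definition above) =====
theorem generate_class_to_index_spec : Claim_equal_generate_class_to_index := by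
  intro fr en _ _
  show generate_class_to_index fr en = generate_class_to_index_alt fr en
  show ((en.foldl pvStepA (fr.foldl pvStepA (PySem.Dict.empty, 0))).1).items =
      ((fr.map pvKey ++ en.map pvKey).zipIdx.foldl (pvStepB (fr.map pvKey ++ en.map pvKey)) PySem.Dict.empty).items
  rw [pvLoopB, ← List.foldl_append, ← List.map_append]
  have h1 : (fr ++ en).foldl pvStepA (PySem.Dict.empty, 0) =
      ((fr ++ en).map pvKey).foldl pvStepK (pvEnum [], ((List.length ([] : List String) : Nat) : Int)) := by
    rw [List.foldl_map]; rfl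
  rw [h1, pvLoopA]
  have h2 : PySem.Set.update ([] : List String) ((fr ++ en).map pvKey) =
      PySem.List.dedup ((fr ++ en).map pvKey) := by
    simp [PySem.Set.update, PySem.List.dedup_eq_ofList, PySem.Set.ofList_eq_foldl]
  simp only [h2]
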